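-- pv_equiv track=rewrite | github.com/Armand028/Python- | read_raw.py | is_rigorous
-- ===== SOURCE A (Python) =====
-- def is_rigorous(l):
--     '''list of str->bool
--     Returns True if every character in the list appears exactlly 2 times or the list is empty.
--     Otherwise, it returns False.
--
--     Precondition: You may assume that every element in the list appears even number of times
--     (i.e. that the list is clean-up by clean_up function)
--
--     >>> is_rigorous(['E', '#', 'D', '$', 'D', '$', 'E', '#'])
--     True
--     >>> is_rigorous(['A', 'B', 'A', 'A', 'A', 'B'])
--     False
--     '''
--     t=True
--     if l==[]:
--         return True
--     else:
--         for y in range(len(l)):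
--             num=l.count(l[y])
--             if num%2==1:
--                 t=False
--                 return t
--         return t
-- ===== SOURCE B (Python) =====
-- def is_rigorous(l):
--     odd = set()
--     for y in l:
--         if y in odd:
--             odd.discard(y)
--         else:
--             odd.add(y)
--     return not odd
-- ===== Notes on version B (the rewrite author's own statement) =====
-- stated objective: idiomatic
-- what changed: Replaces the nested count-per-index scan with a single pass maintaining the set of elements seen an odd number of times, returning True iff that set ends empty.
import Mathlib
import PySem

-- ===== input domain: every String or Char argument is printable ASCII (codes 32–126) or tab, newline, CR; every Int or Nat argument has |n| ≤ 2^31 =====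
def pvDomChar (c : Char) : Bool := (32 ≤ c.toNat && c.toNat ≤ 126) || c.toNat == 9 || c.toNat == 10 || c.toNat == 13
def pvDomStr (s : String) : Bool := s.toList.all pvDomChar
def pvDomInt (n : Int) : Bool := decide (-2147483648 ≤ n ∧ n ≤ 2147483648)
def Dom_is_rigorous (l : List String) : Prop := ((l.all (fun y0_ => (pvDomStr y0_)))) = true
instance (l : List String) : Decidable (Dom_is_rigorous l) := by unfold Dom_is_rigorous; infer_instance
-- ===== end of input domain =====

-- B replaces A's nested count-per-index scan by one pass keeping the set of elements seen an odd number of times (single pass instead of nested scans).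

-- ===== PORT A =====
-- the 'for y in range(len(l))' loop with its early return, over the remaining index list
def isRigorousLoopA (l : List String) : List Int → Bool
  | [] => true
  | y :: ys =>
    let num := l.count (PySem.List.pyGetD l y "")
    if num % 2 == 1 then false else isRigorousLoopA l ys

def is_rigorous (l : List String) : Bool :=
  if l = [] then true
  else isRigorousLoopA l (PySem.List.pyRange 0 l.length 1)

-- ===== PORT B =====
def is_rigorous_alt (l : List String) : Bool :=
  let odd := l.foldl (fun s y => if PySem.Set.contains s y then PySem.Set.discard s y else PySem.Set.add s y) PySem.Set.empty
  odd.isEmpty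

-- ===== PRECONDITION & SPEC =====
def Spec_is_rigorous (l : List String) (out : Bool) : Prop := out = is_rigorous_alt l
instance (l : List String) (out : Bool) : Decidable (Spec_is_rigorous l out) := by unfold Spec_is_rigorous; infer_instance

-- ===== CLAIM (what is proved, stated in full; the proofs are below) =====
def Claim_equal_is_rigorous : Prop := ∀ (l : List String), Dom_is_rigorous l → Spec_is_rigorous l (is_rigorous l)

-- ===== LEMMAS AND PROOFS =====

-- A's loop returns true iff every inspected index points at an element with even count
theorem loopA_true_iff (l : List String) (ys : List Int) :
    isRigorousLoopA l ys = true ↔ ∀ y ∈ ys, l.count (PySem.List.pyGetD l y "") % 2 ≠ 1 := by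
  induction ys with
  | nil => simp [isRigorousLoopA]
  | cons y ys ih =>
    simp only [isRigorousLoopA, List.mem_cons]
    split_ifs with h
    · simp only [beq_iff_eq] at h
      constructor
      · intro hc; cases hc
      · intro hall; exact absurd h (hall y (Or.inl rfl))
    · simp only [beq_iff_eq] at h
      rw [ih]
      constructor
      · rintro hall z (rfl | hz); exact h; exact hall z hz
      · intro hall z hz; exact hall z (Or.inr hz)

-- B's toggle-fold: membership in the final set is the parity of the count
theorem mem_toggle_fold (xs : List String) (s : List String) (x : String) :
    x ∈ xs.foldl (fun s y => if PySem.Set.contains s y then PySem.Set.discard s y else PySem.Set.add s y) s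
      ↔ Xor' (x ∈ s) (xs.count x % 2 = 1) := by
  induction xs generalizing s with
  | nil => simp [Xor']
  | cons y ys ih =>
    simp only [List.foldl_cons, ih, List.count_cons]
    by_cases hxy : x = y
    · subst hxy
      by_cases hs : x ∈ s <;>
        simp [hs, PySem.Set.mem_discard, Xor'] <;> omega
    · by_cases hs : y ∈ s <;>
        simp [hs, hxy, Ne.symm hxy, PySem.Set.mem_discard, Xor']

theorem is_rigorous_alt_true_iff (l : List String) :
    is_rigorous_alt l = true ↔ ∀ x ∈ l, l.count x % 2 ≠ 1 := by
  unfold is_rigorous_alt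
  rw [List.isEmpty_iff, List.eq_nil_iff_forall_not_mem]
  constructor
  · intro h x hx hodd
    exact h x ((mem_toggle_fold l PySem.Set.empty x).mpr (by simp [PySem.Set.empty, Xor', hodd]))
  · intro h x hx
    have := (mem_toggle_fold l PySem.Set.empty x).mp hx
    simp [PySem.Set.empty, Xor'] at this
    exact h x (List.count_pos_iff.mp (by omega)) this

-- ===== VERDICT (by name: the statement is the Claim_ definition above) =====
theorem is_rigorous_spec : Claim_equal_is_rigorous := by
  intro l _
  unfold Spec_is_rigorous is_rigorous
  split_ifs with hnil
  · subst hnil; rfl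
  · rw [Bool.eq_iff_iff, loopA_true_iff, is_rigorous_alt_true_iff]
    constructor
    · intro ha x hx
      obtain ⟨i, hi, rfl⟩ := List.mem_iff_getElem.mp hx
      have hmem : (i : Int) ∈ PySem.List.pyRange 0 l.length 1 := by
        rw [PySem.List.mem_pyRange_one]
        omega
      have := ha (i : Int) hmem
      rwa [PySem.List.pyGetD_natCast, List.getD_eq_getElem _ _ hi] at this
    · intro hb y hy
      rw [PySem.List.mem_pyRange_one] at hy
      obtain ⟨h0, hlen⟩ := hy
      have hlt : y.toNat < l.length := by omega
      have hnat : y = ((y.toNat : Nat) : Int) := by omega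
      rw [hnat, PySem.List.pyGetD_natCast, List.getD_eq_getElem _ _ hlt]
      exact hb _ (l.getElem_mem hlt)
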